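-- pv_equiv track=rewrite | github.com/mdiller/dotabase-builder | builder_parts/voices.py | name_to_url
-- ===== SOURCE A (Python) =====
-- def name_to_url(name):
-- 	conversions = {
-- 		' ': '_',
-- 		'\'': '%27',
-- 		'.': '%2E',
-- 		'&': '%26'
-- 	}
-- 	for key in conversions:
-- 		name = name.replace(key, conversions[key])
-- 	return name
-- ===== SOURCE B (Python) =====
-- def name_to_url(name):
-- 	conversions = {
-- 		' ': '_',
-- 		'\'': '%27',
-- 		'.': '%2E',
-- 		'&': '%26'
-- 	}
-- 	return ''.join(conversions.get(c, c) for c in name)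
-- ===== Notes on version B (the rewrite author's own statement) =====
-- stated objective: idiomatic
-- what changed: Replaces A's four sequential full-string .replace passes (one per dict key) with a single traversal mapping each character through the dict and joining; valid because no replacement output contains a replacement key.
import Mathlib
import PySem

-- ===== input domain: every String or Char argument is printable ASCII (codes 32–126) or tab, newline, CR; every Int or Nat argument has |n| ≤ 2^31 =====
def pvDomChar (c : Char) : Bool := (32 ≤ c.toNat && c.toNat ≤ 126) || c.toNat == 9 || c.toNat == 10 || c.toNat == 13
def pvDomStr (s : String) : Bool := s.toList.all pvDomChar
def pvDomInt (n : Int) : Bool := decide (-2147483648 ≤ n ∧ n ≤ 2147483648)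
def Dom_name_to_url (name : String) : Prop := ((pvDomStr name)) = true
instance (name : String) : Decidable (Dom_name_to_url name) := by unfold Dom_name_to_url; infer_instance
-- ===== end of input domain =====

-- B replaces A's four sequential full-string replace passes by one pass mapping each
-- character through the conversions dict and joining (idiomatic single traversal).

-- ===== PORT A =====
def pvConversions : PySem.Dict String String :=
  ((((PySem.Dict.empty).insert " " "_").insert "'" "%27").insert "." "%2E").insert "&" "%26"

def name_to_url (name : String) : String :=
  pvConversions.keys.foldl
    (fun n key => PySem.Str.replace n key ((pvConversions.get? key).getD "")) name

-- ===== PORT B =====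
def pvConversionsB : PySem.Dict Char String :=
  ((((PySem.Dict.empty).insert ' ' "_").insert '\'' "%27").insert '.' "%2E").insert '&' "%26"

def name_to_url_alt (name : String) : String :=
  PySem.Str.join "" (name.toList.map (fun c => pvConversionsB.getD c (String.ofList [c])))

-- ===== PRECONDITION & SPEC =====
def Spec_name_to_url (name : String) (out : String) : Prop := out = name_to_url_alt name
instance (name : String) (out : String) : Decidable (Spec_name_to_url name out) := by unfold Spec_name_to_url; infer_instance

-- ===== CLAIM (what is proved, stated in full; the proofs are below) =====
def Claim_equal_name_to_url : Prop := ∀ (name : String), Dom_name_to_url name → Spec_name_to_url name (name_to_url name)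

-- ===== LEMMAS AND PROOFS =====

-- single-character replace is a flatMap over the characters
theorem go_single (k : Char) (new : List Char) :
    ∀ (fuel : Nat) (l acc : List Char), l.length ≤ fuel →
      PySem.Chars.replace.go [k] new fuel l acc
        = acc.reverse ++ l.flatMap (fun c => if c = k then new else [c]) := by
  intro fuel
  induction fuel with
  | zero =>
    intro l acc h
    have : l = [] := List.length_eq_zero_iff.mp (Nat.le_zero.mp h)
    subst this
    simp [PySem.Chars.replace.go]
  | succ n ih =>
    intro l acc h
    cases l with
    | nil => simp [PySem.Chars.replace.go]
    | cons c t =>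
      by_cases hc : c = k
      · subst hc
        have hpre : List.isPrefixOf [c] (c :: t) = true := by
          simp [List.isPrefixOf]
        simp only [PySem.Chars.replace.go, hpre]
        rw [ih _ _ (by simpa using Nat.le_of_succ_le_succ h)]
        simp
      · have hpre : List.isPrefixOf [k] (c :: t) = false := by
          simp only [List.isPrefixOf, Bool.and_eq_false_iff, beq_eq_false_iff_ne, ne_eq]
          exact Or.inl fun h => hc h.symm
        simp only [PySem.Chars.replace.go, hpre]
        have ht : t.length ≤ n := Nat.le_of_succ_le_succ h
        rw [ih t (c :: acc) ht]
        simp [hc]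

theorem replace_single (s : List Char) (k : Char) (new : List Char) :
    PySem.Chars.replace s [k] new = s.flatMap (fun c => if c = k then new else [c]) := by
  rw [PySem.Chars.replace, if_neg (by simp)]
  exact go_single k new s.length s [] (le_refl _)

def pvG (c : Char) : List Char :=
  if c = ' ' then "_".toList
  else if c = '\'' then "%27".toList
  else if c = '.' then "%2E".toList
  else if c = '&' then "%26".toList
  else [c]

theorem step_char (c : Char) :
    ((((if c = ' ' then "_".toList else [c]).flatMap
        (fun c => if c = '\'' then "%27".toList else [c])).flatMap
        (fun c => if c = '.' then "%2E".toList else [c])).flatMap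
        (fun c => if c = '&' then "%26".toList else [c])) = pvG c := by
  by_cases h1 : c = ' '
  · subst h1; decide
  · by_cases h2 : c = '\''
    · subst h2; decide
    · by_cases h3 : c = '.'
      · subst h3; decide
      · by_cases h4 : c = '&'
        · subst h4; decide
        · simp [pvG, h1, h2, h3, h4]

theorem chain_eq (s : List Char) :
    ((((s.flatMap (fun c => if c = ' ' then "_".toList else [c])).flatMap
        (fun c => if c = '\'' then "%27".toList else [c])).flatMap
        (fun c => if c = '.' then "%2E".toList else [c])).flatMap
        (fun c => if c = '&' then "%26".toList else [c])) = s.flatMap pvG := by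
  induction s with
  | nil => rfl
  | cons c t ih =>
    simp only [List.flatMap_cons, List.flatMap_append] at *
    rw [ih, step_char]

theorem getD_eq_pvG (c : Char) :
    (pvConversionsB.getD c (String.ofList [c])).toList = pvG c := by
  by_cases h1 : c = ' '
  · subst h1; decide
  · by_cases h2 : c = '\''
    · subst h2; decide
    · by_cases h3 : c = '.'
      · subst h3; decide
      · by_cases h4 : c = '&'
        · subst h4; decide
        · have : pvConversionsB.getD c (String.ofList [c]) = String.ofList [c] := by
            simp [pvConversionsB, PySem.Dict.getD_insert, h1, h2, h3, h4,
              PySem.Dict.getD_empty]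
          rw [this]; simp [pvG, h1, h2, h3, h4]

theorem flatten_intersperse_nil : ∀ (ls : List (List Char)),
    (List.intersperse ([] : List Char) ls).flatten = ls.flatten := by
  intro ls
  induction ls with
  | nil => rfl
  | cons a t ih =>
    cases t with
    | nil => rfl
    | cons b u =>
      show (a :: [] :: List.intersperse [] (b :: u)).flatten = _
      simp only [List.flatten_cons] at ih ⊢
      rw [ih]
      simp

theorem join_nil_eq_flatten (ls : List (List Char)) :
    PySem.Chars.join [] ls = ls.flatten := by
  rw [PySem.Chars.join, List.intercalate]
  exact flatten_intersperse_nil ls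

theorem toList_eq (name : String) :
    (name_to_url name).toList = (name_to_url_alt name).toList := by
  have hA : (name_to_url name).toList = name.toList.flatMap pvG := by
    show (PySem.Str.replace (PySem.Str.replace (PySem.Str.replace
        (PySem.Str.replace name " " "_") "'" "%27") "." "%2E") "&" "%26").toList
        = name.toList.flatMap pvG
    simp only [PySem.Str.toList_replace]
    have h1 : (" " : String).toList = [' '] := rfl
    have h2 : ("'" : String).toList = ['\''] := rfl
    have h3 : ("." : String).toList = ['.'] := rfl
    have h4 : ("&" : String).toList = ['&'] := rfl
    rw [h1, h2, h3, h4, replace_single, replace_single, replace_single, replace_single]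
    exact chain_eq _
  have hB : (name_to_url_alt name).toList = name.toList.flatMap pvG := by
    show (PySem.Str.join "" (name.toList.map (fun c => pvConversionsB.getD c (String.ofList [c])))).toList
        = name.toList.flatMap pvG
    rw [PySem.Str.toList_join]
    have hsep : ("" : String).toList = ([] : List Char) := rfl
    rw [hsep, List.map_map]
    simp only [Function.comp_def, getD_eq_pvG]
    rw [join_nil_eq_flatten]
    exact List.flatMap_def.symm
  rw [hA, hB]

-- ===== VERDICT (by name: the statement is the Claim_ definition above) =====
theorem name_to_url_spec : Claim_equal_name_to_url := by
  intro name _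
  show name_to_url name = name_to_url_alt name
  have := toList_eq name
  exact String.toList_injective this
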